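-- pv_equiv track=rewrite | github.com/kroq86/honeybadger | learned_branch_ranker.py | _instruction_shape
-- ===== SOURCE A (Python) =====
-- def _opcode(instruction_text: str) -> str:
--     return instruction_text.split()[0]
--
-- def _opcode_family(opcode: str) -> str:
--     if opcode in {"READ", "LOAD", "MOV"}:
--         return "load"
--     if opcode in {"WRITE", "STORE"}:
--         return "store"
--     if opcode in {"ADD", "SUB"}:
--         return "arith"
--     if opcode in {"CMP", "TEST"}:
--         return "compare"
--     if opcode.startswith("J"):
--         return "branch"
--     if opcode == "CONST":
--         return "const"
--     if opcode == "HALT":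
--         return "terminal"
--     return "other"
--
-- def _control_role(opcode: str) -> str:
--     if opcode in {"JZ", "JNZ", "JL", "JLE", "JG", "JGE"}:
--         return "cond_branch"
--     if opcode == "JMP":
--         return "jump"
--     if opcode in {"CMP", "TEST"}:
--         return "compare"
--     if opcode == "MOV":
--         return "move"
--     if opcode in {"ADD", "SUB"}:
--         return "update"
--     if opcode in {"READ", "LOAD"}:
--         return "load"
--     if opcode in {"WRITE", "STORE"}:
--         return "store"
--     if opcode == "CONST":
--         return "const"
--     if opcode == "HALT":
--         return "terminal"
--     return "other"
--
-- def _argument_tokens(instruction_text: str) -> tuple[str, ...]: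
--     parts = instruction_text.replace(",", " ").split()
--     return tuple(parts[1:])
--
-- def _instruction_shape(instruction_text: str) -> dict[str, str]:
--     opcode = _opcode(instruction_text)
--     args = _argument_tokens(instruction_text)
--     joined = " ".join(args)
--     return {
--         "family": _opcode_family(opcode),
--         "control_role": _control_role(opcode),
--         "arity": str(min(len(args), 3)),
--         "has_input_ref": "1" if "input[" in joined else "0",
--         "has_output_ref": "1" if "output[" in joined else "0",
--         "has_memory_ref": "1" if "mem[" in joined.lower() else "0",
--         "has_label": "1" if any(arg.isidentifier() and not arg.startswith("R") and "[" not in arg for arg in args) else "0",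
--         "has_immediate": "1" if any(arg.lstrip("-").isdigit() for arg in args) else "0",
--         "writes_register": "1" if args and args[0].startswith("R") and opcode not in {"CMP", "TEST"} else "0",
--     }
-- ===== SOURCE B (Python) =====
-- _FAMILY = {
--     "READ": "load", "LOAD": "load", "MOV": "load",
--     "WRITE": "store", "STORE": "store",
--     "ADD": "arith", "SUB": "arith",
--     "CMP": "compare", "TEST": "compare",
--     "CONST": "const", "HALT": "terminal",
-- }
--
-- _ROLE = {
--     "JZ": "cond_branch", "JNZ": "cond_branch", "JL": "cond_branch",
--     "JLE": "cond_branch", "JG": "cond_branch", "JGE": "cond_branch",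
--     "JMP": "jump", "CMP": "compare", "TEST": "compare", "MOV": "move",
--     "ADD": "update", "SUB": "update", "READ": "load", "LOAD": "load",
--     "WRITE": "store", "STORE": "store", "CONST": "const", "HALT": "terminal",
-- }
--
-- def _tokens(text, extra_delims):
--     # hand-rolled scanner: maximal runs of characters that are neither
--     # whitespace nor one of extra_delims
--     tokens = []
--     cur = []
--     for ch in text:
--         if ch.isspace() or ch in extra_delims:
--             if cur:
--                 tokens.append(''.join(cur))
--                 cur = []
--         else:
--             cur.append(ch)
--     if cur:
--         tokens.append(''.join(cur))
--     return tokens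
--
-- def _instruction_shape(instruction_text: str) -> dict[str, str]:
--     opcode = _tokens(instruction_text, '')[0]
--     args = _tokens(instruction_text, ',')[1:]
--     has_input = has_output = has_memory = has_label = has_immediate = False
--     for arg in args:
--         if 'input[' in arg:
--             has_input = True
--         if 'output[' in arg:
--             has_output = True
--         if 'mem[' in arg.lower():
--             has_memory = True
--         if arg.isidentifier() and not arg.startswith('R') and '[' not in arg:
--             has_label = True
--         if arg.lstrip('-').isdigit():
--             has_immediate = True
--     family = _FAMILY.get(opcode, "branch" if opcode.startswith("J") else "other")
--     writes = bool(args) and args[0].startswith('R') and opcode not in ("CMP", "TEST")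
--     return {
--         "family": family,
--         "control_role": _ROLE.get(opcode, "other"),
--         "arity": str(min(len(args), 3)),
--         "has_input_ref": "1" if has_input else "0",
--         "has_output_ref": "1" if has_output else "0",
--         "has_memory_ref": "1" if has_memory else "0",
--         "has_label": "1" if has_label else "0",
--         "has_immediate": "1" if has_immediate else "0",
--         "writes_register": "1" if writes else "0",
--     }
-- ===== Notes on version B (the rewrite author's own statement) =====
-- stated objective: alternative
-- what changed: Replaces A's string-library pipeline (replace(',',' ')/split()/' '.join plus substring tests on the joined string and two separate any() scans) with a hand-rolled character-level scanner that tokenizes the instruction itself, one accumulating pass over the tokens for all five flags, and table (dict) lookups with a computed default instead of the two if-chain classifiers; it trades the speed of CPython's C string methods for an explicit single-scan formulation.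
import Mathlib
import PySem

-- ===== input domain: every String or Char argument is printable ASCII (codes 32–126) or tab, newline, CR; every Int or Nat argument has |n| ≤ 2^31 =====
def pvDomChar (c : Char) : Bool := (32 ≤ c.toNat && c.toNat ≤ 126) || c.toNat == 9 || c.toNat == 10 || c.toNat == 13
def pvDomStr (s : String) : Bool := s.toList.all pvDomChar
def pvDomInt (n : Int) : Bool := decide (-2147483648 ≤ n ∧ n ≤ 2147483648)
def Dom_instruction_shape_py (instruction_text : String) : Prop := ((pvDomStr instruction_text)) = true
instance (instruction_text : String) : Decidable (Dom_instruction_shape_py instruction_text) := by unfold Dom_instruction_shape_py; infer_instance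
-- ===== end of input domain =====

-- B replaces A's replace/split/join/any string pipeline by a hand-rolled character-level
-- tokenizer plus one accumulating pass over the tokens, and A's if-chain classifiers by
-- table lookups (objective: alternative decomposition; same asymptotic cost, interpreted scan instead of C string methods).

-- ===== PORT A =====
-- exact port of arg.isidentifier() on the printable-ASCII domain (first char letter/underscore, rest alnum/underscore)
def pyIsIdentifier (cs : List Char) : Bool :=
  match cs with
  | [] => false
  | c :: rest => (PySem.Chars.isalpha c || c == '_') && rest.all (fun d => PySem.Chars.isalnum d || d == '_')

-- exact port of s.lstrip("-"): drop all leading '-' characters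
def lstripDash (cs : List Char) : List Char := cs.dropWhile (fun c => c == '-')

-- _opcode: instruction_text.split()[0]; the IndexError on a whitespace-only string is excluded by Pre_
def opcode_py (instruction_text : String) : String :=
  (PySem.List.pyGet? (PySem.Str.split₀ instruction_text) 0).getD ""

def opcode_family_py (opcode : String) : String :=
  if opcode == "READ" || opcode == "LOAD" || opcode == "MOV" then "load"
  else if opcode == "WRITE" || opcode == "STORE" then "store"
  else if opcode == "ADD" || opcode == "SUB" then "arith"
  else if opcode == "CMP" || opcode == "TEST" then "compare"
  else if PySem.Str.startswith opcode "J" then "branch"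
  else if opcode == "CONST" then "const"
  else if opcode == "HALT" then "terminal"
  else "other"

def control_role_py (opcode : String) : String :=
  if opcode == "JZ" || opcode == "JNZ" || opcode == "JL" || opcode == "JLE" || opcode == "JG" || opcode == "JGE" then "cond_branch"
  else if opcode == "JMP" then "jump"
  else if opcode == "CMP" || opcode == "TEST" then "compare"
  else if opcode == "MOV" then "move"
  else if opcode == "ADD" || opcode == "SUB" then "update"
  else if opcode == "READ" || opcode == "LOAD" then "load"
  else if opcode == "WRITE" || opcode == "STORE" then "store"
  else if opcode == "CONST" then "const"
  else if opcode == "HALT" then "terminal"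
  else "other"

-- _argument_tokens: instruction_text.replace(",", " ").split()[1:]
def argument_tokens_py (instruction_text : String) : List String :=
  PySem.List.slice (PySem.Str.split₀ (PySem.Str.replace instruction_text "," " ")) (some 1) none

def instruction_shape_py (instruction_text : String) : List (String × String) :=
  let opcode := opcode_py instruction_text
  let args := argument_tokens_py instruction_text
  let joined := PySem.Str.join " " args
  [("family", opcode_family_py opcode),
   ("control_role", control_role_py opcode),
   ("arity", PySem.Int.toStr (min (args.length : Int) 3)),
   ("has_input_ref", if PySem.Str.isIn "input[" joined then "1" else "0"),
   ("has_output_ref", if PySem.Str.isIn "output[" joined then "1" else "0"),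
   ("has_memory_ref", if PySem.Str.isIn "mem[" (PySem.Str.lower joined) then "1" else "0"),
   ("has_label", if args.any (fun arg => pyIsIdentifier arg.toList && !(PySem.Str.startswith arg "R") && !(PySem.Str.isIn "[" arg)) then "1" else "0"),
   ("has_immediate", if args.any (fun arg => PySem.Chars.strIsdigit (lstripDash arg.toList)) then "1" else "0"),
   ("writes_register", if (match args with | [] => false | a0 :: _ => PySem.Str.startswith a0 "R") && !(opcode == "CMP" || opcode == "TEST") then "1" else "0")]

-- ===== PORT B =====
-- dict literal (all keys distinct) as an association-list Dict
def famTable : PySem.Dict String String :=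
  ⟨[("READ", "load"), ("LOAD", "load"), ("MOV", "load"),
   ("WRITE", "store"), ("STORE", "store"),
   ("ADD", "arith"), ("SUB", "arith"),
   ("CMP", "compare"), ("TEST", "compare"),
   ("CONST", "const"), ("HALT", "terminal")]⟩

def roleTable : PySem.Dict String String :=
  ⟨[("JZ", "cond_branch"), ("JNZ", "cond_branch"), ("JL", "cond_branch"),
   ("JLE", "cond_branch"), ("JG", "cond_branch"), ("JGE", "cond_branch"),
   ("JMP", "jump"), ("CMP", "compare"), ("TEST", "compare"), ("MOV", "move"),
   ("ADD", "update"), ("SUB", "update"), ("READ", "load"), ("LOAD", "load"),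
   ("WRITE", "store"), ("STORE", "store"), ("CONST", "const"), ("HALT", "terminal")]⟩

-- Source B's _tokens loop: hand-rolled scanner collecting maximal runs of non-delimiter chars
def tokGo (p : Char → Bool) : List Char → List Char → List (List Char) → List (List Char)
  | [], cur, toks => if cur.isEmpty then toks else toks ++ [cur]
  | c :: rest, cur, toks =>
      if p c then
        (if cur.isEmpty then tokGo p rest [] toks else tokGo p rest [] (toks ++ [cur]))
      else tokGo p rest (cur ++ [c]) toks

-- _tokens(text, extra_delims): 'ch.isspace() or ch in extra_delims'; ''.join(cur) = String.ofList cur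
-- (exact: extra_delims is only ever the literal '' or ',')
def pyTokens (text : String) (extraDelims : String) : List String :=
  (tokGo (fun c => PySem.Chars.isspace c || extraDelims.toList.contains c) text.toList [] []).map String.ofList

-- the single accumulating pass of Source B's flag for-loop
def bLoop : List String → Bool → Bool → Bool → Bool → Bool → Bool × Bool × Bool × Bool × Bool
  | [], hi, ho, hm, hl, him => (hi, ho, hm, hl, him)
  | arg :: rest, hi, ho, hm, hl, him =>
      bLoop rest
        (if PySem.Str.isIn "input[" arg then true else hi)
        (if PySem.Str.isIn "output[" arg then true else ho)
        (if PySem.Str.isIn "mem[" (PySem.Str.lower arg) then true else hm)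
        (if pyIsIdentifier arg.toList && !(PySem.Str.startswith arg "R") && !(PySem.Str.isIn "[" arg) then true else hl)
        (if PySem.Chars.strIsdigit (lstripDash arg.toList) then true else him)

def instruction_shape_py_alt (instruction_text : String) : List (String × String) :=
  -- _tokens(text,'')[0]; the IndexError on a whitespace-only string is excluded by Pre_
  let opcode := (PySem.List.pyGet? (pyTokens instruction_text "") 0).getD ""
  let args := PySem.List.slice (pyTokens instruction_text ",") (some 1) none
  let flags := bLoop args false false false false false
  let family := (PySem.Dict.get? famTable opcode).getD (if PySem.Str.startswith opcode "J" then "branch" else "other")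
  let writes := (match args with | [] => false | a0 :: _ => PySem.Str.startswith a0 "R") && !(opcode == "CMP" || opcode == "TEST")
  [("family", family),
   ("control_role", (PySem.Dict.get? roleTable opcode).getD "other"),
   ("arity", PySem.Int.toStr (min (args.length : Int) 3)),
   ("has_input_ref", if flags.1 then "1" else "0"),
   ("has_output_ref", if flags.2.1 then "1" else "0"),
   ("has_memory_ref", if flags.2.2.1 then "1" else "0"),
   ("has_label", if flags.2.2.2.1 then "1" else "0"),
   ("has_immediate", if flags.2.2.2.2 then "1" else "0"),
   ("writes_register", if writes then "1" else "0")]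

-- ===== PRECONDITION & SPEC =====
-- Pre_ excludes exactly the inputs with no non-whitespace token, where Python A's split()[0] raises IndexError.
def Pre_instruction_shape_py (instruction_text : String) : Prop :=
  PySem.Str.split₀ instruction_text ≠ []
instance (instruction_text : String) : Decidable (Pre_instruction_shape_py instruction_text) := by unfold Pre_instruction_shape_py; infer_instance

def pvWitness_instruction_shape_py : String := "ADD R1, 5"

def Spec_instruction_shape_py (instruction_text : String) (out : List (String × String)) : Prop := out = instruction_shape_py_alt instruction_text
instance (instruction_text : String) (out : List (String × String)) : Decidable (Spec_instruction_shape_py instruction_text out) := by unfold Spec_instruction_shape_py; infer_instance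

-- ===== CLAIM (what is proved, stated in full; the proofs are below) =====
def Claim_equal_instruction_shape_py : Prop := ∀ (instruction_text : String), Dom_instruction_shape_py instruction_text → Pre_instruction_shape_py instruction_text → Spec_instruction_shape_py instruction_text (instruction_shape_py instruction_text)

-- ===== LEMMAS AND PROOFS =====

-- the scanner's output accumulator factors out
theorem tokGo_append (p : Char → Bool) : ∀ (rest cur : List Char) (toks : List (List Char)),
    tokGo p rest cur toks = toks ++ tokGo p rest cur []
  | [], cur, toks => by
      cases cur <;> simp [tokGo]
  | c :: rest, cur, toks => by
      by_cases hp : p c = true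
      · cases cur with
        | nil =>
            simp only [tokGo, hp, if_true, List.isEmpty_nil]
            exact tokGo_append p rest [] toks
        | cons a l =>
            have h1 := tokGo_append p rest [] (toks ++ [a :: l])
            have h2 := tokGo_append p rest [] ([a :: l])
            simp only [tokGo, hp, if_true, List.isEmpty_cons, Bool.false_eq_true, if_false,
              List.nil_append]
            rw [h1, h2]
            simp
      · simp only [tokGo, if_neg hp]
        exact tokGo_append p rest (cur ++ [c]) toks

-- the library split₀ loop over a char-mapped string IS the hand-rolled scanner,
-- for any map f whose image turns exactly the p-delimiters into whitespace
theorem split₀go_eq_tokGo (f : Char → Char) (p : Char → Bool)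
    (hf1 : ∀ c, PySem.Chars.isspace (f c) = p c) (hf2 : ∀ c, p c = false → f c = c) :
    ∀ (rest cur : List Char) (acc : List (List Char)),
      PySem.Chars.split₀.go (rest.map f) cur acc = acc.reverse ++ tokGo p rest cur.reverse []
  | [], cur, acc => by
      cases cur with
      | nil => simp [PySem.Chars.split₀.go, tokGo]
      | cons a l =>
          have h : (l.reverse ++ [a]).isEmpty = false := by simp
          simp [PySem.Chars.split₀.go, tokGo, h]
  | c :: rest, cur, acc => by
      by_cases hp : p c = true
      · have hsp : PySem.Chars.isspace (f c) = true := by rw [hf1]; exact hp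
        cases cur with
        | nil =>
            simp only [List.map_cons, PySem.Chars.split₀.go, hsp, if_true, List.isEmpty_nil,
              List.reverse_nil, tokGo, hp]
            exact split₀go_eq_tokGo f p hf1 hf2 rest [] acc
        | cons a l =>
            have hrev : (l.reverse ++ [a]).isEmpty = false := by simp
            have ih := split₀go_eq_tokGo f p hf1 hf2 rest [] ((a :: l).reverse :: acc)
            simp only [List.reverse_cons, List.reverse_nil] at ih
            simp only [List.map_cons, PySem.Chars.split₀.go, hsp, if_true, List.isEmpty_cons,
              Bool.false_eq_true, if_false, List.reverse_cons, tokGo, hp, hrev, List.nil_append]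
            rw [ih, tokGo_append p rest [] [l.reverse ++ [a]]]
            simp
      · have hsp : PySem.Chars.isspace (f c) = false := eq_false_of_ne_true (by rw [hf1]; exact hp)
        have hfc : f c = c := hf2 c (eq_false_of_ne_true hp)
        have hsp' : PySem.Chars.isspace c = false := hfc ▸ hsp
        have ih := split₀go_eq_tokGo f p hf1 hf2 rest (c :: cur) acc
        simp only [List.map_cons, hfc, PySem.Chars.split₀.go, hsp', Bool.false_eq_true, if_false,
          tokGo, if_neg hp]
        simpa using ih

def commaMap (c : Char) : Char := if c == ',' then ' ' else c

-- replace(",", " ") is the character map commaMap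
theorem replaceGo_comma : ∀ (fuel : Nat) (l acc : List Char), l.length ≤ fuel →
    PySem.Chars.replace.go [','] [' '] fuel l acc = acc.reverse ++ l.map commaMap
  | 0, l, acc, h => by
      have : l = [] := List.eq_nil_of_length_eq_zero (Nat.le_zero.mp h)
      subst this; simp [PySem.Chars.replace.go]
  | fuel + 1, [], acc, _ => by simp [PySem.Chars.replace.go]
  | fuel + 1, c :: t, acc, h => by
      by_cases hc : c = ','
      · subst hc
        have hpre : [','].isPrefixOf (',' :: t) = true := by simp [List.isPrefixOf]
        simp only [PySem.Chars.replace.go, hpre, if_true]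
        have := replaceGo_comma fuel t (' ' :: acc) (by simpa using Nat.lt_succ_iff.mp (by simpa using h))
        simp only [List.length_cons] at h
        rw [show List.drop [','].length (',' :: t) = t from rfl]
        rw [show ([' '] : List Char).reverse ++ acc = ' ' :: acc from rfl, this]
        simp [commaMap]
      · have hpre : [','].isPrefixOf (c :: t) = false := by
          simp [List.isPrefixOf, Ne.symm hc]
        simp only [PySem.Chars.replace.go, hpre]
        have := replaceGo_comma fuel t (c :: acc) (by simpa [Nat.lt_succ_iff] using h)
        rw [this]
        simp [commaMap, hc]

theorem replace_comma (s : List Char) : PySem.Chars.replace s [','] [' '] = s.map commaMap := by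
  rw [PySem.Chars.replace]
  simp only [List.isEmpty_iff, reduceCtorEq, if_false]
  simpa using replaceGo_comma s.length s [] le_rfl

-- the whitespace-only scanner is split()
theorem tokens_ws (t : String) : pyTokens t "" = PySem.Str.split₀ t := by
  apply List.map_injective_iff.mpr (fun a b h => String.toList_injective h)
  rw [PySem.Str.split₀_map_toList, pyTokens]
  rw [List.map_map,
      show String.toList ∘ String.ofList = id from funext (fun l => String.toList_ofList), List.map_id]
  have hpred : (fun c => PySem.Chars.isspace c || ("" : String).toList.contains c) = PySem.Chars.isspace := by
    funext c; simp
  rw [hpred, PySem.Chars.split₀,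
      show t.toList = t.toList.map id from (List.map_id _).symm,
      split₀go_eq_tokGo id PySem.Chars.isspace (fun _ => rfl) (fun c _ => rfl)]
  simp

-- the comma-aware scanner is replace(",", " ").split()
theorem tokens_comma (t : String) : pyTokens t "," = PySem.Str.split₀ (PySem.Str.replace t "," " ") := by
  apply List.map_injective_iff.mpr (fun a b h => String.toList_injective h)
  rw [PySem.Str.split₀_map_toList, pyTokens]
  rw [List.map_map,
      show String.toList ∘ String.ofList = id from funext (fun l => String.toList_ofList), List.map_id]
  rw [PySem.Str.toList_replace,
      show ("," : String).toList = [','] from rfl,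
      show (" " : String).toList = [' '] from rfl,
      replace_comma]
  have hcomma : ("," : String).toList = [','] := rfl
  have hf1 : ∀ c, PySem.Chars.isspace (commaMap c) = (PySem.Chars.isspace c || ("," : String).toList.contains c) := by
    intro c
    rw [hcomma]
    by_cases hc : c = ','
    · subst hc; decide
    · simp [commaMap, hc]
  have hf2 : ∀ c, (PySem.Chars.isspace c || ("," : String).toList.contains c) = false → commaMap c = c := by
    intro c h
    rw [hcomma] at h
    simp only [Bool.or_eq_false_iff] at h
    have : c ≠ ',' := by
      intro hc; subst hc; simp at h
    simp [commaMap, this]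
  rw [PySem.Chars.split₀,
      split₀go_eq_tokGo commaMap _ (fun c => hf1 c) hf2]
  simp

-- a list avoiding c is a prefix of x ++ c :: y iff it is a prefix of x
theorem prefix_sep : ∀ (sub x y : List Char) {c : Char}, c ∉ sub → (sub <+: (x ++ c :: y) ↔ sub <+: x)
  | [], _, _, _, _ => by simp
  | s :: sub', [], y, c, h => by
      simp only [List.nil_append]
      constructor
      · intro hp
        rw [List.cons_prefix_cons] at hp
        exact absurd (hp.1 ▸ List.mem_cons_self) h
      · intro hp
        exact absurd hp (by simp)
  | s :: sub', a :: x', y, c, h => by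
      simp only [List.cons_append, List.cons_prefix_cons]
      rw [prefix_sep sub' x' y (fun hm => h (List.mem_cons_of_mem _ hm))]

-- a list avoiding c is an infix of x ++ c :: y iff it is an infix of x or of y
theorem infix_sep : ∀ (a : List Char) (sub b : List Char) {c : Char}, c ∉ sub →
    (sub <:+: (a ++ c :: b) ↔ sub <:+: a ∨ sub <:+: b)
  | [], sub, b, c, h => by
      simp only [List.nil_append, List.infix_cons_iff, List.infix_nil]
      rw [show (sub <+: c :: b) ↔ sub <+: ([] : List Char) from prefix_sep sub [] b h]
      simp
  | a0 :: a', sub, b, c, h => by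
      have h1 : (a0 :: a') ++ c :: b = a0 :: (a' ++ c :: b) := rfl
      rw [h1, List.infix_cons_iff, infix_sep a' sub b h,
          show (sub <+: a0 :: (a' ++ c :: b)) ↔ sub <+: a0 :: a' from prefix_sep sub (a0 :: a') b h,
          List.infix_cons_iff]
      tauto

-- a space-free, nonempty pattern occurs in ' '.join(parts) iff it occurs in some part
theorem isIn_join_chars : ∀ (parts : List (List Char)) (sub : List Char), sub ≠ [] → (' ') ∉ sub →
    PySem.Chars.isIn sub (PySem.Chars.join [' '] parts) = parts.any (fun p => PySem.Chars.isIn sub p)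
  | [], sub, hne, _ => by
      rw [PySem.Chars.join_nil, Bool.eq_iff_iff, PySem.Chars.isIn_iff_infix, List.infix_nil]
      simp [hne]
  | [p], sub, _, _ => by
      rw [PySem.Chars.join_singleton]
      simp
  | p :: q :: rest, sub, hne, hsp => by
      rw [PySem.Chars.join_cons_cons, Bool.eq_iff_iff, PySem.Chars.isIn_iff_infix,
          List.append_assoc, List.singleton_append, infix_sep p sub _ hsp]
      have ih := isIn_join_chars (q :: rest) sub hne hsp
      rw [Bool.eq_iff_iff, PySem.Chars.isIn_iff_infix] at ih
      rw [ih]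
      simp [List.any_cons, PySem.Chars.isIn_iff_infix]

-- lowercasing commutes with joining on spaces
theorem lower_join : ∀ (l : List (List Char)),
    PySem.Chars.lower (PySem.Chars.join [' '] l) = PySem.Chars.join [' '] (l.map PySem.Chars.lower)
  | [] => by simp [PySem.Chars.join_nil, PySem.Chars.lower]
  | [p] => by simp [PySem.Chars.join_singleton]
  | p :: q :: rest => by
      rw [PySem.Chars.join_cons_cons,
          show (p :: q :: rest).map PySem.Chars.lower
             = PySem.Chars.lower p :: PySem.Chars.lower q :: rest.map PySem.Chars.lower from rfl,
          PySem.Chars.join_cons_cons,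
          show (PySem.Chars.lower q :: rest.map PySem.Chars.lower)
             = (q :: rest).map PySem.Chars.lower from rfl,
          ← lower_join (q :: rest)]
      simp only [PySem.Chars.lower, List.map_append]
      rfl

-- the Str-level forms used by the ports
theorem isIn_join_str (sub : String) (hne : sub.toList ≠ []) (hsp : (' ') ∉ sub.toList) (args : List String) :
    PySem.Str.isIn sub (PySem.Str.join " " args) = args.any (fun a => PySem.Str.isIn sub a) := by
  simp only [PySem.Str.isIn_eq, PySem.Str.toList_join]
  rw [show (" " : String).toList = [' '] from rfl, isIn_join_chars _ _ hne hsp, List.any_map]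
  rfl

theorem isIn_lower_join_str (sub : String) (hne : sub.toList ≠ []) (hsp : (' ') ∉ sub.toList) (args : List String) :
    PySem.Str.isIn sub (PySem.Str.lower (PySem.Str.join " " args))
      = args.any (fun a => PySem.Str.isIn sub (PySem.Str.lower a)) := by
  simp only [PySem.Str.isIn_eq, PySem.Str.toList_lower, PySem.Str.toList_join]
  rw [show (" " : String).toList = [' '] from rfl, lower_join, List.map_map,
      isIn_join_chars _ _ hne hsp, List.any_map]
  rfl

-- (if c then true else x) followed by an or, reassociated
theorem ifOrShuffle (c x r : Bool) : ((if c then true else x) || r) = (x || (c || r)) := by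
  cases c <;> cases x <;> simp

-- the single pass computes the five any() scans
theorem bLoop_eq : ∀ (args : List String) (hi ho hm hl him : Bool),
    bLoop args hi ho hm hl him =
      (hi || args.any (fun a => PySem.Str.isIn "input[" a),
       ho || args.any (fun a => PySem.Str.isIn "output[" a),
       hm || args.any (fun a => PySem.Str.isIn "mem[" (PySem.Str.lower a)),
       hl || args.any (fun arg => pyIsIdentifier arg.toList && !(PySem.Str.startswith arg "R") && !(PySem.Str.isIn "[" arg)),
       him || args.any (fun arg => PySem.Chars.strIsdigit (lstripDash arg.toList)))
  | [], hi, ho, hm, hl, him => by simp [bLoop]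
  | arg :: rest, hi, ho, hm, hl, him => by
      rw [bLoop, bLoop_eq rest]
      simp only [List.any_cons, Prod.mk.injEq]
      exact ⟨ifOrShuffle _ _ _, ifOrShuffle _ _ _, ifOrShuffle _ _ _, ifOrShuffle _ _ _, ifOrShuffle _ _ _⟩

-- the family table lookup equals A's if-chain
theorem fam_eq (op : String) :
    (PySem.Dict.get? famTable op).getD (if PySem.Str.startswith op "J" then "branch" else "other")
      = opcode_family_py op := by
  by_cases h1 : op = "READ"
  · subst h1; decide
  by_cases h2 : op = "LOAD"
  · subst h2; decide
  by_cases h3 : op = "MOV"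
  · subst h3; decide
  by_cases h4 : op = "WRITE"
  · subst h4; decide
  by_cases h5 : op = "STORE"
  · subst h5; decide
  by_cases h6 : op = "ADD"
  · subst h6; decide
  by_cases h7 : op = "SUB"
  · subst h7; decide
  by_cases h8 : op = "CMP"
  · subst h8; decide
  by_cases h9 : op = "TEST"
  · subst h9; decide
  by_cases h10 : op = "CONST"
  · subst h10; decide
  by_cases h11 : op = "HALT"
  · subst h11; decide
  simp [famTable, PySem.Dict.get?, List.find?, opcode_family_py,
        beq_eq_false_iff_ne.mpr h1, beq_eq_false_iff_ne.mpr h2, beq_eq_false_iff_ne.mpr h3, beq_eq_false_iff_ne.mpr h4, beq_eq_false_iff_ne.mpr h5, beq_eq_false_iff_ne.mpr h6, beq_eq_false_iff_ne.mpr h7, beq_eq_false_iff_ne.mpr h8, beq_eq_false_iff_ne.mpr h9, beq_eq_false_iff_ne.mpr h10, beq_eq_false_iff_ne.mpr h11,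
        beq_eq_false_iff_ne.mpr (Ne.symm h1), beq_eq_false_iff_ne.mpr (Ne.symm h2), beq_eq_false_iff_ne.mpr (Ne.symm h3), beq_eq_false_iff_ne.mpr (Ne.symm h4), beq_eq_false_iff_ne.mpr (Ne.symm h5), beq_eq_false_iff_ne.mpr (Ne.symm h6), beq_eq_false_iff_ne.mpr (Ne.symm h7), beq_eq_false_iff_ne.mpr (Ne.symm h8), beq_eq_false_iff_ne.mpr (Ne.symm h9), beq_eq_false_iff_ne.mpr (Ne.symm h10), beq_eq_false_iff_ne.mpr (Ne.symm h11)]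

-- the role table lookup equals A's if-chain
theorem role_eq (op : String) :
    (PySem.Dict.get? roleTable op).getD "other" = control_role_py op := by
  by_cases h1 : op = "JZ"
  · subst h1; decide
  by_cases h2 : op = "JNZ"
  · subst h2; decide
  by_cases h3 : op = "JL"
  · subst h3; decide
  by_cases h4 : op = "JLE"
  · subst h4; decide
  by_cases h5 : op = "JG"
  · subst h5; decide
  by_cases h6 : op = "JGE"
  · subst h6; decide
  by_cases h7 : op = "JMP"
  · subst h7; decide
  by_cases h8 : op = "CMP"
  · subst h8; decide
  by_cases h9 : op = "TEST"
  · subst h9; decide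
  by_cases h10 : op = "MOV"
  · subst h10; decide
  by_cases h11 : op = "ADD"
  · subst h11; decide
  by_cases h12 : op = "SUB"
  · subst h12; decide
  by_cases h13 : op = "READ"
  · subst h13; decide
  by_cases h14 : op = "LOAD"
  · subst h14; decide
  by_cases h15 : op = "WRITE"
  · subst h15; decide
  by_cases h16 : op = "STORE"
  · subst h16; decide
  by_cases h17 : op = "CONST"
  · subst h17; decide
  by_cases h18 : op = "HALT"
  · subst h18; decide
  simp [roleTable, PySem.Dict.get?, List.find?, control_role_py,
        beq_eq_false_iff_ne.mpr h1, beq_eq_false_iff_ne.mpr h2, beq_eq_false_iff_ne.mpr h3, beq_eq_false_iff_ne.mpr h4, beq_eq_false_iff_ne.mpr h5, beq_eq_false_iff_ne.mpr h6, beq_eq_false_iff_ne.mpr h7, beq_eq_false_iff_ne.mpr h8, beq_eq_false_iff_ne.mpr h9, beq_eq_false_iff_ne.mpr h10, beq_eq_false_iff_ne.mpr h11, beq_eq_false_iff_ne.mpr h12, beq_eq_false_iff_ne.mpr h13, beq_eq_false_iff_ne.mpr h14, beq_eq_false_iff_ne.mpr h15, beq_eq_false_iff_ne.mpr h16, beq_eq_false_iff_ne.mpr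 h17, beq_eq_false_iff_ne.mpr h18,
        beq_eq_false_iff_ne.mpr (Ne.symm h1), beq_eq_false_iff_ne.mpr (Ne.symm h2), beq_eq_false_iff_ne.mpr (Ne.symm h3), beq_eq_false_iff_ne.mpr (Ne.symm h4), beq_eq_false_iff_ne.mpr (Ne.symm h5), beq_eq_false_iff_ne.mpr (Ne.symm h6), beq_eq_false_iff_ne.mpr (Ne.symm h7), beq_eq_false_iff_ne.mpr (Ne.symm h8), beq_eq_false_iff_ne.mpr (Ne.symm h9), beq_eq_false_iff_ne.mpr (Ne.symm h10), beq_eq_false_iff_ne.mpr (Ne.symm h11), beq_eq_false_iff_ne.mpr (Ne.symm h12), beq_eq_false_iff_ne.mpr (Ne.symm h13), beq_eq_false_iff_ne.mpr (Ne.symm h14), beq_eq_false_iff_ne.mpr (Ne.symm h15), beq_eq_false_iff_ne.mpr (Ne.symm h16), beq_eq_false_iff_ne.mpr (Ne.symm h17), beq_eq_false_iff_ne.mpr (Ne.symm h18)]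

-- the two row lists agree for any opcode and argument list
theorem shape_core (opcode : String) (args : List String) :
    ([("family", opcode_family_py opcode),
      ("control_role", control_role_py opcode),
      ("arity", PySem.Int.toStr (min (args.length : Int) 3)),
      ("has_input_ref", if PySem.Str.isIn "input[" (PySem.Str.join " " args) then "1" else "0"),
      ("has_output_ref", if PySem.Str.isIn "output[" (PySem.Str.join " " args) then "1" else "0"),
      ("has_memory_ref", if PySem.Str.isIn "mem[" (PySem.Str.lower (PySem.Str.join " " args)) then "1" else "0"),
      ("has_label", if args.any (fun arg => pyIsIdentifier arg.toList && !(PySem.Str.startswith arg "R") && !(PySem.Str.isIn "[" arg)) then "1" else "0"),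
      ("has_immediate", if args.any (fun arg => PySem.Chars.strIsdigit (lstripDash arg.toList)) then "1" else "0"),
      ("writes_register", if (match args with | [] => false | a0 :: _ => PySem.Str.startswith a0 "R") && !(opcode == "CMP" || opcode == "TEST") then "1" else "0")]
      : List (String × String))
    = [("family", (PySem.Dict.get? famTable opcode).getD (if PySem.Str.startswith opcode "J" then "branch" else "other")),
       ("control_role", (PySem.Dict.get? roleTable opcode).getD "other"),
       ("arity", PySem.Int.toStr (min (args.length : Int) 3)),
       ("has_input_ref", if (bLoop args false false false false false).1 then "1" else "0"),
       ("has_output_ref", if (bLoop args false false false false false).2.1 then "1" else "0"),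
       ("has_memory_ref", if (bLoop args false false false false false).2.2.1 then "1" else "0"),
       ("has_label", if (bLoop args false false false false false).2.2.2.1 then "1" else "0"),
       ("has_immediate", if (bLoop args false false false false false).2.2.2.2 then "1" else "0"),
       ("writes_register", if (match args with | [] => false | a0 :: _ => PySem.Str.startswith a0 "R") && !(opcode == "CMP" || opcode == "TEST") then "1" else "0")] := by
  rw [bLoop_eq]
  dsimp only
  rw [isIn_join_str "input[" (by decide) (by decide),
      isIn_join_str "output[" (by decide) (by decide),
      isIn_lower_join_str "mem[" (by decide) (by decide),
      fam_eq, role_eq]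
  simp only [Bool.false_or]

-- ===== VERDICT (by name: the statement is the Claim_ definition above) =====
theorem instruction_shape_py_spec : Claim_equal_instruction_shape_py := by
  intro t _ _
  unfold Spec_instruction_shape_py instruction_shape_py instruction_shape_py_alt
  dsimp only
  rw [shape_core, tokens_ws, tokens_comma]
  unfold opcode_py argument_tokens_py
  rfl
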